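-- pv_equiv track=rewrite | github.com/ad25343/InformaticaConversion | app/backend/agents/reconciliation_agent.py | _check_field_coverage_items
-- ===== SOURCE A (Python) =====
-- def _check_field_coverage_items(
--     fields: list[str],
--     all_code_low: str,
-- ) -> tuple[int, int, list[dict]]:
--     """Check target field coverage. Returns (verified, total, mismatched)."""
--     mismatched: list[dict] = []
--     verified = 0
--     for field in fields:
--         if field.lower() in all_code_low:
--             verified += 1
--         else:
--             mismatched.append({
--                 "type":   "TARGET_FIELD",
--                 "field":  field,
--                 "detail": f"Target field '{field}' not found in any generated file.",
--             })
--     return verified, len(fields), mismatched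
-- ===== SOURCE B (Python) =====
-- def _check_field_coverage_items(fields, all_code_low):
--     """Index-based re-implementation: precompute, for each needed pattern length,
--     the set of all substrings of all_code_low of that length, then answer each
--     field by one hash-set lookup instead of a fresh substring scan."""
--     lows = [f.lower() for f in fields]
--     grams = {}
--     for L in sorted({len(w) for w in lows}):
--         grams[L] = {all_code_low[i:i + L] for i in range(len(all_code_low) - L + 1)}
--     verified = 0
--     mismatched = []
--     for field, low in zip(fields, lows):
--         if low in grams[len(low)]:
--             verified += 1
--         else:
--             mismatched.append({
--                 "type":   "TARGET_FIELD",
--                 "field":  field,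
--                 "detail": f"Target field '{field}' not found in any generated file.",
--             })
--     return verified, len(fields), mismatched
-- ===== Notes on version B (the rewrite author's own statement) =====
-- stated objective: faster
-- what changed: B replaces A's per-field substring scan of the code text by a precomputed index: for each distinct lowered-field length it builds the hash set of all substrings of that length in one pass over the text, then answers every field with a single set lookup.
import Mathlib
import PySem

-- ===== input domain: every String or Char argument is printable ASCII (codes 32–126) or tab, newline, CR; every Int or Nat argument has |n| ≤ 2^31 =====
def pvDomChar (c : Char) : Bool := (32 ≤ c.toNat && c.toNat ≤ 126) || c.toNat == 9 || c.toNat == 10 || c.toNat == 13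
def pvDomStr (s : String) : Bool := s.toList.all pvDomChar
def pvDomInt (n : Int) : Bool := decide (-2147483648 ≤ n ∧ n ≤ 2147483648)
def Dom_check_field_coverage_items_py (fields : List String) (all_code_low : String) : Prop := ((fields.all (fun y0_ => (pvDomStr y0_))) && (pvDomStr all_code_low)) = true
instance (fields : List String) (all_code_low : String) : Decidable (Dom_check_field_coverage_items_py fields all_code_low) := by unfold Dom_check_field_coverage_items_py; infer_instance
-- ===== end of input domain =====

-- B replaces A's per-field substring scan by a precomputed index: for each distinct lowered-field
-- length, the set of all substrings of the text of that length; each field is then one set lookup.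

-- ===== PORT A =====
-- the dict literal appended for a missing field (same text in both Pythons)
def pvMismatchEntry (field : String) : List (String × String) :=
  [("type", "TARGET_FIELD"),
   ("field", field),
   ("detail", "Target field '" ++ field ++ "' not found in any generated file.")]

def check_field_coverage_items_py (fields : List String) (all_code_low : String) :
    Int × Int × (List (List (String × String))) :=
  -- for field in fields: if field.lower() in all_code_low: verified += 1 else mismatched.append(...)
  let r := fields.foldl
    (fun (acc : Int × List (List (String × String))) field =>
      if PySem.Str.isIn (PySem.Str.lower field) all_code_low then
        (acc.1 + 1, acc.2)
      else
        (acc.1, acc.2 ++ [pvMismatchEntry field]))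
    (0, [])
  (r.1, (fields.length : Int), r.2)

-- ===== PORT B =====
-- grams[L] = {all_code_low[i:i+L] for i in range(len(all_code_low) - L + 1)}
def pvGramSet (s : String) (L : Int) : PySem.Set String :=
  PySem.Set.ofList
    ((PySem.List.pyRange 0 ((s.length : Int) - L + 1) 1).map
      (fun i => PySem.Str.slice s (some i) (some (i + L))))

def check_field_coverage_items_py_alt (fields : List String) (all_code_low : String) :
    Int × Int × (List (List (String × String))) :=
  -- lows = [f.lower() for f in fields]
  let lows := fields.map PySem.Str.lower
  -- for L in sorted({len(w) for w in lows}): grams[L] = {...}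
  let lens := PySem.List.sorted
    (PySem.Set.ofList (lows.map (fun w => (w.length : Int)))) (fun x => x) false
  let grams : PySem.Dict Int (PySem.Set String) :=
    lens.foldl (fun d L => d.insert L (pvGramSet all_code_low L)) PySem.Dict.empty
  -- for field, low in zip(fields, lows): if low in grams[len(low)] ...
  let r := (fields.zip lows).foldl
    (fun (acc : Int × List (List (String × String))) fl =>
      if PySem.Set.contains (grams.getD ((fl.2.length : Int)) PySem.Set.empty) fl.2 then
        (acc.1 + 1, acc.2)
      else
        (acc.1, acc.2 ++ [pvMismatchEntry fl.1]))
    (0, [])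
  (r.1, (fields.length : Int), r.2)

-- ===== PRECONDITION & SPEC =====
def Spec_check_field_coverage_items_py (fields : List String) (all_code_low : String) (out : Int × Int × (List (List (String × String)))) : Prop := out = check_field_coverage_items_py_alt fields all_code_low
instance (fields : List String) (all_code_low : String) (out : Int × Int × (List (List (String × String)))) : Decidable (Spec_check_field_coverage_items_py fields all_code_low out) := by unfold Spec_check_field_coverage_items_py; infer_instance

-- ===== CLAIM (what is proved, stated in full; the proofs are below) =====
def Claim_equal_check_field_coverage_items_py : Prop := ∀ (fields : List String) (all_code_low : String), Dom_check_field_coverage_items_py fields all_code_low → Spec_check_field_coverage_items_py fields all_code_low (check_field_coverage_items_py fields all_code_low)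

-- ===== LEMMAS AND PROOFS =====

-- a key not in the loop's list is untouched by the insert loop
theorem pv_getD_foldl_insert_not_mem (f : Int → PySem.Set String) :
    ∀ (t : List Int) (d : PySem.Dict Int (PySem.Set String)) (L : Int), L ∉ t →
      (t.foldl (fun d L => d.insert L (f L)) d).getD L PySem.Set.empty
        = d.getD L PySem.Set.empty := by
  intro t
  induction t with
  | nil => intro d L _; rfl
  | cons a u ih =>
    intro d L h
    rw [List.foldl_cons, ih _ _ (fun hm => h (List.mem_cons_of_mem _ hm)),
        PySem.Dict.getD_insert]
    rw [if_neg (fun (he : L = a) => h (he ▸ List.mem_cons_self))]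

-- a key in the loop's list gets the value the loop computes for it
theorem pv_getD_foldl_insert_mem (f : Int → PySem.Set String) :
    ∀ (t : List Int) (d : PySem.Dict Int (PySem.Set String)) (L : Int), L ∈ t →
      (t.foldl (fun d L => d.insert L (f L)) d).getD L PySem.Set.empty = f L := by
  intro t
  induction t with
  | nil => intro d L h; cases h
  | cons a u ih =>
    intro d L h
    rw [List.foldl_cons]
    by_cases hu : L ∈ u
    · exact ih _ _ hu
    · have ha : L = a := by
        rcases List.mem_cons.mp h with h | h
        · exact h
        · exact absurd h hu
      rw [pv_getD_foldl_insert_not_mem f u _ _ hu, ha, PySem.Dict.getD_insert, if_pos rfl]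

-- a slice of length |low| equals low somewhere iff low occurs in s (List Char level)
theorem pv_gram_mem_chars (s low : List Char) :
    (∃ i ∈ PySem.List.pyRange 0 ((s.length : Int) - (low.length : Int) + 1) 1,
       PySem.List.slice s (some i) (some (i + (low.length : Int))) = low)
    ↔ PySem.Chars.isIn low s = true := by
  rw [← PySem.Chars.exists_prefix_drop_iff_isIn]
  constructor
  · rintro ⟨i, hi, hsl⟩
    rw [PySem.List.mem_pyRange_one] at hi
    obtain ⟨k, rfl⟩ := Int.eq_ofNat_of_zero_le hi.1
    rw [PySem.List.slice_natCast_add] at hsl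
    exact ⟨k, hsl ▸ List.take_prefix _ _⟩
  · rintro ⟨j, hp⟩
    by_cases hnil : low = []
    · subst hnil
      refine ⟨0, ?_, ?_⟩
      · rw [PySem.List.mem_pyRange_one]
        refine ⟨le_refl 0, ?_⟩
        simp only [List.length_nil]
        omega
      · simp [pysem]
    · have hle := hp.length_le
      rw [List.length_drop] at hle
      have hj : j + low.length ≤ s.length := by
        rcases Nat.lt_or_ge j s.length with h | h
        · omega
        · exfalso
          have hz : low.length = 0 := by omega
          exact hnil (List.eq_nil_of_length_eq_zero hz)
      refine ⟨(j : Int), ?_, ?_⟩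
      · rw [PySem.List.mem_pyRange_one]
        constructor
        · omega
        · push_cast; omega
      · rw [PySem.List.slice_natCast_add]
        exact (List.prefix_iff_eq_take.mp hp).symm

-- membership in the length-|low| substring set IS Python's 'low in s'
theorem pv_gram_mem (s low : String) :
    PySem.Set.contains (pvGramSet s (low.length : Int)) low = PySem.Str.isIn low s := by
  apply Bool.eq_iff_iff.mpr
  rw [PySem.Set.contains_iff]
  unfold pvGramSet
  rw [PySem.Set.mem_ofList, List.mem_map]
  simp only [PySem.Str.isIn_eq]
  have hsl : ∀ i : Int,
      (PySem.Str.slice s (some i) (some (i + (low.length : Int))) = low)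
        ↔ (PySem.List.slice s.toList (some i) (some (i + (low.length : Int))) = low.toList) := by
    intro i
    constructor
    · intro h
      have h' := congrArg String.toList h
      simpa using h'
    · intro h
      apply String.toList_inj.mp
      simpa using h
  rw [← pv_gram_mem_chars s.toList low.toList]
  simp only [String.length_toList]
  constructor
  · rintro ⟨i, hi, h⟩
    exact ⟨i, by simpa using hi, (hsl i).mp h⟩
  · rintro ⟨i, hi, h⟩
    exact ⟨i, by simpa using hi, (hsl i).mpr h⟩

-- zip(fields, [f.lower() for f in fields]) pairs each field with its own lowering
theorem pv_zip_lower (l : List String) :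
    l.zip (l.map PySem.Str.lower) = l.map (fun f => (f, PySem.Str.lower f)) := by
  induction l with
  | nil => rfl
  | cons f t ih => simp [ih]

-- B's lookup loop over the zipped list computes exactly A's membership loop
theorem pv_fold_eq (fields : List String) (s : String) :
    List.foldl
      (fun (acc : Int × List (List (String × String))) fl =>
        if (((PySem.List.sorted
              (PySem.Set.ofList ((fields.map PySem.Str.lower).map (fun w => (w.length : Int))))
              (fun x => x) false).foldl
              (fun d L => d.insert L (pvGramSet s L)) PySem.Dict.empty).getD
                ((fl.2.length : Int)) PySem.Set.empty).contains fl.2 then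
          (acc.1 + 1, acc.2)
        else (acc.1, acc.2 ++ [pvMismatchEntry fl.1]))
      (0, []) (fields.map (fun f => (f, PySem.Str.lower f)))
    = List.foldl
      (fun (acc : Int × List (List (String × String))) field =>
        if PySem.Str.isIn (PySem.Str.lower field) s then (acc.1 + 1, acc.2)
        else (acc.1, acc.2 ++ [pvMismatchEntry field]))
      (0, []) fields := by
  rw [List.foldl_map]
  apply PySem.List.foldl_congr_mem
  intro acc f hf
  have hmem : (((PySem.Str.lower f).length : Int)) ∈ PySem.List.sorted
      (PySem.Set.ofList ((fields.map PySem.Str.lower).map (fun w => (w.length : Int))))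
      (fun x => x) false := by
    rw [PySem.List.mem_sorted, PySem.Set.mem_ofList, List.mem_map]
    exact ⟨PySem.Str.lower f, List.mem_map.mpr ⟨f, hf, rfl⟩, rfl⟩
  rw [pv_getD_foldl_insert_mem _ _ _ _ hmem, pv_gram_mem]

-- ===== VERDICT (by name: the statement is the Claim_ definition above) =====
theorem check_field_coverage_items_py_spec : Claim_equal_check_field_coverage_items_py := by
  intro fields s _
  unfold Spec_check_field_coverage_items_py check_field_coverage_items_py check_field_coverage_items_py_alt
  dsimp only
  rw [pv_zip_lower, pv_fold_eq]
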